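-- pv_equiv track=rewrite | github.com/geb2701/ALGORITMOS-Y-ESTRUCTURAS-DE-DATOS-I | Unidad 3 Matrices/Ejercicio 2/GustavoBruno.py | MatrizB
-- ===== SOURCE A (Python) =====
-- def MatrizB(n):
--     nuevaMatriz = []
--
--     poner = n -1
--     for i in range (n):
--         nuevaMatriz.append([])
--         for j in range (n):
--             if (j == poner):
--                 valor = 3 ** (poner)
--                 poner -= 1
--             else:
--                 valor = 0
--             nuevaMatriz[i].append(valor)
--
--     return nuevaMatriz
-- ===== SOURCE B (Python) =====
-- def MatrizB(n):
--     rows = []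
--     p = 1
--     for k in range(n):  # k-th row counted from the bottom; p == 3**k
--         rows.append([0] * k + [p] + [0] * (n - 1 - k))
--         p *= 3
--     rows.reverse()
--     return rows
-- ===== Notes on version B (the rewrite author's own statement) =====
-- stated objective: alternative
-- what changed: Replaces A's nested double loop with a per-cell conditional and a mutating decrementing counter by building the rows back-to-front (bottom row first), each row concatenated from three slabs (leading zeros, the power, trailing zeros), maintaining the power incrementally by repeated multiplication instead of exponentiation, and reversing the row list at the end.
import Mathlib
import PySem

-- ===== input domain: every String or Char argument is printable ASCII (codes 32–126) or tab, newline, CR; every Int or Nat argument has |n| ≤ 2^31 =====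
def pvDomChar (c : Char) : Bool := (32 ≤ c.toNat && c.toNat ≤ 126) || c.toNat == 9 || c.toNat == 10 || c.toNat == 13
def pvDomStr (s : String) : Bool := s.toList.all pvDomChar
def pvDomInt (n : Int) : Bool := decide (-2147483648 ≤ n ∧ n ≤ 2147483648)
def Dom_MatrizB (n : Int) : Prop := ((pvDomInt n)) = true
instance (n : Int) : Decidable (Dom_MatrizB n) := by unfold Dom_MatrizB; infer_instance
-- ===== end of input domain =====

-- B builds the rows back-to-front (bottom row first) from three concatenated slabs,
-- maintaining the power incrementally (p *= 3) instead of A's nested loops with a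
-- per-cell conditional and a decrementing counter (objective: alternative).

-- ===== PORT A =====
-- A appends an empty row and then appends each 'valor' to that (last) row; this is
-- modeled by building the row as the inner fold's state.  '3 ** poner' is only
-- evaluated when j == poner with j ∈ range(n), so poner ≥ 0 there and '.toNat' is exact.
def MatrizB (n : Int) : List (List Int) :=
  ((PySem.List.pyRange 0 n 1).foldl
    (fun (st : List (List Int) × Int) _i =>
      let inner := (PySem.List.pyRange 0 n 1).foldl
        (fun (st2 : List Int × Int) j =>
          if j = st2.2 then (st2.1 ++ [3 ^ st2.2.toNat], st2.2 - 1)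
          else (st2.1 ++ [(0 : Int)], st2.2))
        (([] : List Int), st.2)
      (st.1 ++ [inner.1], inner.2))
    (([] : List (List Int)), n - 1)).1

-- ===== PORT B =====
-- k ∈ range(n) is ≥ 0 and n-1-k ≥ 0 there, so the two '.toNat' are exact.
def MatrizB_alt (n : Int) : List (List Int) :=
  ((PySem.List.pyRange 0 n 1).foldl
    (fun (st : List (List Int) × Int) k =>
      (st.1 ++ [List.replicate k.toNat (0 : Int) ++ [st.2]
                  ++ List.replicate (n - 1 - k).toNat (0 : Int)],
       st.2 * 3))
    (([] : List (List Int)), 1)).1.reverse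

-- ===== PRECONDITION & SPEC =====
def Spec_MatrizB (n : Int) (out : List (List Int)) : Prop := out = MatrizB_alt n
instance (n : Int) (out : List (List Int)) : Decidable (Spec_MatrizB n out) := by unfold Spec_MatrizB; infer_instance

-- ===== CLAIM (what is proved, stated in full; the proofs are below) =====
def Claim_equal_MatrizB : Prop := ∀ (n : Int), Dom_MatrizB n → Spec_MatrizB n (MatrizB n)

-- ===== LEMMAS AND PROOFS =====

/-- Target row: zeros with 3^(N-1-i) at column N-1-i. -/
def pvRowT (N i : Nat) : List Int :=
  (List.range N).map (fun j => if j = N - 1 - i then (3 : Int) ^ (N - 1 - i) else 0)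

/-- The row A's inner loop produces when started with counter p. -/
def pvRowP (m : Nat) (p : Int) : List Int :=
  (List.range m).map (fun (j : Nat) => if (j : Int) = p then (3 : Int) ^ p.toNat else 0)

theorem pvRowP_succ (m : Nat) (p : Int) :
    pvRowP (m + 1) p = pvRowP m p ++ [if (m : Int) = p then (3 : Int) ^ p.toNat else 0] := by
  unfold pvRowP
  rw [List.range_succ, List.map_append, List.map_singleton]

theorem pvRowP_eq_rowT (N k : Nat) (hk : k < N) :
    pvRowP N ((N : Int) - 1 - k) = pvRowT N k := by
  unfold pvRowP pvRowT
  apply List.map_congr_left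
  intro j hj
  have hj' := List.mem_range.mp hj
  have h1 : (((N : Int) - 1 - k)).toNat = N - 1 - k := by omega
  have h2 : ((j : Int) = (N : Int) - 1 - (k : Int)) ↔ (j = N - 1 - k) := by omega
  rw [h1]
  by_cases hc : j = N - 1 - k
  · rw [if_pos (h2.mpr hc), if_pos hc]
  · rw [if_neg (fun h => hc (h2.mp h)), if_neg hc]

/-- A's inner loop characterised: folding over range m from counter p appends, per j,
3^p at the single position j = p (if 0 ≤ p < m) and 0 elsewhere, decrementing once. -/
theorem pvInnerA (m : Nat) (p : Int) (acc : List Int) :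
    (((List.range m).map (fun k : Nat => (k : Int))).foldl
      (fun (st2 : List Int × Int) j =>
        if j = st2.2 then (st2.1 ++ [3 ^ st2.2.toNat], st2.2 - 1)
        else (st2.1 ++ [(0 : Int)], st2.2)) (acc, p))
    = (acc ++ pvRowP m p, if 0 ≤ p ∧ p < m then p - 1 else p) := by
  induction m with
  | zero => simp [pvRowP]
  | succ m ih =>
    rw [List.range_succ, List.map_append, List.foldl_append, ih,
      List.map_singleton, List.foldl_cons, List.foldl_nil, pvRowP_succ]
    dsimp only
    by_cases h : 0 ≤ p ∧ p < m
    · have hif : (0 ≤ p ∧ p < ((m + 1 : Nat) : Int)) := by push_cast; omega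
      rw [if_pos h, if_pos hif]
      have hne : ¬ ((m : Int) = p - 1) := by omega
      have hne2 : ¬ ((m : Int) = p) := by omega
      rw [if_neg hne, if_neg hne2]
      simp
    · rw [if_neg h]
      by_cases hm : ((m : Nat) : Int) = p
      · have hif : (0 ≤ p ∧ p < ((m + 1 : Nat) : Int)) := by push_cast at *; omega
        rw [if_pos hm, if_pos hm, if_pos hif, ← hm]
        simp
      · have hif : ¬ (0 ≤ p ∧ p < ((m + 1 : Nat) : Int)) := by push_cast at *; omega
        rw [if_neg hm, if_neg hm, if_neg hif]
        simp

/-- A's outer loop invariant: after k rows the matrix is the first k target rows and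
the counter is N-1-k. -/
theorem pvOuterA (N : Nat) (k : Nat) (hk : k ≤ N) :
    (((List.range k).map (fun k : Nat => (k : Int))).foldl
      (fun (st : List (List Int) × Int) _i =>
        let inner := (((List.range N).map (fun k : Nat => (k : Int))).foldl
          (fun (st2 : List Int × Int) j =>
            if j = st2.2 then (st2.1 ++ [3 ^ st2.2.toNat], st2.2 - 1)
            else (st2.1 ++ [(0 : Int)], st2.2))
          (([] : List Int), st.2))
        (st.1 ++ [inner.1], inner.2))
      (([] : List (List Int)), (N : Int) - 1))
    = ((List.range k).map (pvRowT N), (N : Int) - 1 - k) := by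
  induction k with
  | zero => simp
  | succ k ih =>
    rw [List.range_succ, List.map_append, List.foldl_append, ih (by omega),
      List.map_singleton, List.foldl_cons, List.foldl_nil]
    dsimp only
    rw [pvInnerA]
    have hif : (0 ≤ (N : Int) - 1 - k ∧ (N : Int) - 1 - k < N) := by omega
    rw [if_pos hif, List.nil_append, pvRowP_eq_rowT N k (by omega),
      List.map_append, List.map_singleton, Prod.mk.injEq]
    constructor
    · rfl
    · push_cast; ring

theorem pvRangeCast (a : Nat) :
    PySem.List.pyRange 0 (a : Int) 1 = (List.range a).map (fun k : Nat => (k : Int)) := by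
  rw [PySem.List.pyRange_one]
  simp

/-- The row B builds for the k-th position from the bottom. -/
def pvRowB (N k : Nat) : List Int :=
  List.replicate k (0 : Int) ++ [(3 : Int) ^ k] ++ List.replicate (N - 1 - k) (0 : Int)

/-- B's fold invariant: after m steps the accumulator holds the m bottom rows and p = 3^m. -/
theorem pvFoldB (N : Nat) (m : Nat) (hm : m ≤ N) :
    (((List.range m).map (fun k : Nat => (k : Int))).foldl
      (fun (st : List (List Int) × Int) k =>
        (st.1 ++ [List.replicate k.toNat (0 : Int) ++ [st.2]
                    ++ List.replicate ((N : Int) - 1 - k).toNat (0 : Int)],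
         st.2 * 3))
      (([] : List (List Int)), 1))
    = ((List.range m).map (pvRowB N), 3 ^ m) := by
  induction m with
  | zero => simp
  | succ m ih =>
    rw [List.range_succ, List.map_append, List.foldl_append, ih (by omega),
      List.map_singleton, List.foldl_cons, List.foldl_nil]
    dsimp only
    have h1 : ((m : Nat) : Int).toNat = m := by omega
    have h2 : ((N : Int) - 1 - (m : Nat)).toNat = N - 1 - m := by omega
    rw [h1, h2, List.map_append, List.map_singleton, Prod.mk.injEq]
    exact ⟨rfl, (pow_succ 3 m).symm⟩

/-- pvRowB written positionally. -/
theorem pvRowB_char (N k : Nat) (hk : k < N) :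
    pvRowB N k = (List.range N).map (fun t => if t = k then (3 : Int) ^ k else 0) := by
  apply List.ext_getElem
  · simp [pvRowB]; omega
  · intro t h1 h2
    simp only [List.getElem_map, List.getElem_range]
    simp only [pvRowB, List.getElem_append, List.getElem_replicate, List.length_append,
      List.length_replicate, List.length_singleton, List.getElem_singleton]
    split_ifs <;> first | rfl | omega

/-- The k-th row from the bottom is the (N-1-k)-th target row. -/
theorem pvRowB_rev (N j : Nat) (hj : j < N) : pvRowB N (N - 1 - j) = pvRowT N j := by
  rw [pvRowB_char N (N - 1 - j) (by omega)]
  rfl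

/-- Reversing B's bottom-up rows gives the target matrix. -/
theorem pvRevB (N : Nat) :
    ((List.range N).map (pvRowB N)).reverse = (List.range N).map (pvRowT N) := by
  apply List.ext_getElem
  · simp
  · intro j h1 h2
    have hjN : j < N := by simpa using h2
    rw [List.getElem_reverse]
    simp only [List.getElem_map, List.getElem_range, List.length_map, List.length_range]
    exact pvRowB_rev N j hjN

-- ===== VERDICT (by name: the statement is the Claim_ definition above) =====
theorem MatrizB_spec : Claim_equal_MatrizB := by
  intro n _
  unfold Spec_MatrizB MatrizB MatrizB_alt
  by_cases hn : n ≤ 0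
  · rw [PySem.List.pyRange_one_eq_nil (by omega)]
    simp
  · obtain ⟨N, rfl⟩ : ∃ N : Nat, n = (N : Int) := ⟨n.toNat, by omega⟩
    rw [pvRangeCast, pvOuterA N N le_rfl, pvFoldB N N le_rfl]
    exact (pvRevB N).symm
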